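-- pv_equiv track=rewrite | github.com/akepa/advent-of-code | day22/day22.py | find_up
-- ===== SOURCE A (Python) =====
-- def find_up(map, r, c, num_rows, num_cols):
--     for i in range(r - 1, -1, -1):
--         if map[i][c] == '.' or map[i][c] == '#':
--             return (c + 1, i + 1)
--     for i in range(num_rows - 1, r - 1, -1):
--         if map[i][c] == '.' or map[i][c] == '#':
--             return (c + 1, i + 1)
--     return None
-- ===== SOURCE B (Python) =====
-- def find_up(map, r, c, num_rows, num_cols):
--     best_below = None
--     best_wrap = None
--     for i in range(num_rows):
--         ch = map[i][c]
--         if ch == '.' or ch == '#':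
--             if i < r:
--                 best_below = i
--             else:
--                 best_wrap = i
--     best = best_below if best_below is not None else best_wrap
--     if best is None:
--         return None
--     return (c + 1, best + 1)
-- ===== Notes on version B (the rewrite author's own statement) =====
-- stated objective: alternative
-- what changed: A does an early-exit backward scan with wraparound (rows r-1..0, then num_rows-1..r) returning at the first track cell; B makes one full forward pass over rows 0..num_rows-1 keeping two accumulators (last track row below r, last track row at or above r) and picks the answer after the loop.
-- outside the precondition, e.g. on find_up(['#', '.', '#'], 3, 0, 2, 1): A returns (1, 3), B returns (1, 2); on find_up(['.', ''], 1, 0, 2, 1): A returns (1, 1), B raises IndexError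
import Mathlib
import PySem

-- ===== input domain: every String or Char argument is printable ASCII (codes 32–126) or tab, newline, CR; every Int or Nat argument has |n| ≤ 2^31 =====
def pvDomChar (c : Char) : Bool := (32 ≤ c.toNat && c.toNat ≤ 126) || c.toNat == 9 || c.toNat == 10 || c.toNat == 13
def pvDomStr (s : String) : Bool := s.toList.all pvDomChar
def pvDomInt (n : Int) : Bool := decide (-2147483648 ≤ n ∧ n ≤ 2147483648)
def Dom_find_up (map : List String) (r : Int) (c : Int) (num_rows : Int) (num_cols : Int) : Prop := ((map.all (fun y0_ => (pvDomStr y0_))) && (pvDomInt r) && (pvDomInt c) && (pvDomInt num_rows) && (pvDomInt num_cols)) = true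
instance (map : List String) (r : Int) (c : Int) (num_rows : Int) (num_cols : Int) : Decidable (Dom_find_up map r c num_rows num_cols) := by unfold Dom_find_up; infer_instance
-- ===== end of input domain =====

-- B replaces A's early-exit backward wrap scan by one full forward pass over rows 0..num_rows-1
-- with two accumulators (last track row below r, last track row at or above r), picking after the
-- loop (objective: alternative). Equal return values on Pre_find_up.

-- the character map[i][c] as Python evaluates it: none = IndexError
def pvCell (map : List String) (c i : Int) : Option Char :=
  (PySem.List.pyGet? map i).bind (fun s => PySem.Str.pyGet? s c)

-- ===== PORT A =====
-- one scan loop of A over the lazy 'range(i, stop, -1)': 'if map[i][c] == '.' or map[i][c] == '#':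
-- return (c + 1, i + 1)'; at an unreadable cell Python raises IndexError and the loop ends
-- (outside Pre_find_up) — the port returns none there
def find_up_scan (map : List String) (c : Int) (i stop : Int) : Option (Int × Int) :=
  if _h : stop < i then
    match pvCell map c i with
    | none => none                           -- Python raises IndexError here; outside Pre_find_up
    | some ch =>
      if ch = '.' ∨ ch = '#' then some (c + 1, i + 1) else find_up_scan map c (i - 1) stop
  else none
termination_by (i - stop).toNat
decreasing_by simp; omega

def find_up (map : List String) (r : Int) (c : Int) (num_rows : Int) (num_cols : Int) : Option (Int × Int) :=
  match find_up_scan map c (r - 1) (-1) with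
  | some p => some p
  | none => find_up_scan map c (num_rows - 1) (r - 1)

-- ===== PORT B =====
-- B's loop over the lazy 'range(num_rows)': ch = map[i][c]; if a track cell, record i in
-- best_below (i < r) or best_wrap; at an unreadable cell Python raises IndexError and the loop
-- ends (outside Pre_find_up) — the port stops with the state reached
def find_up_altLoop (map : List String) (r c : Int) (i n : Int) (s : Option Int × Option Int) :
    Option Int × Option Int :=
  if _h : i < n then
    match pvCell map c i with
    | none => s                              -- Python raises IndexError here; outside Pre_find_up
    | some ch =>
      find_up_altLoop map r c (i + 1) n
        (if ch = '.' ∨ ch = '#' then (if i < r then (some i, s.2) else (s.1, some i)) else s)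
  else s
termination_by (n - i).toNat
decreasing_by simp; omega

def find_up_alt (map : List String) (r : Int) (c : Int) (num_rows : Int) (num_cols : Int) : Option (Int × Int) :=
  let st := find_up_altLoop map r c 0 num_rows (none, none)
  match (match st.1 with | some i => some i | none => st.2) with
  | none => none
  | some i => some (c + 1, i + 1)

-- ===== PRECONDITION & SPEC =====
-- Pre_ excludes (a) inputs with an unreadable cell map[i][c] among the rows either pass visits,
-- where Python A or B raises IndexError, and (b) out-of-contract calls (the callers keep
-- 0 <= r < num_rows = len(map)) on which A's scan leaves the window 0..num_rows-1 and meets an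
-- unreadable or track cell there — extra rows num_rows..r-1 for r > num_rows, or
-- negative-index wraparound rows -1..r for r < 0 — cells B's forward pass over 0..num_rows-1
-- never reads. Admitted: empty-window calls (r <= 0 and num_rows <= r); calls with 0 <= r,
-- 0 <= num_rows, readable cells on rows 0..max(r,num_rows)-1 and no track cell on rows
-- num_rows..r-1; and calls with r < 0, readable cells on rows 0..num_rows-1 and either a track
-- cell among them or an all-readable all-miss wrapped tail -1..r.
def Pre_find_up (map : List String) (r : Int) (c : Int) (num_rows : Int) (num_cols : Int) : Prop :=
  (r ≤ 0 ∧ num_rows ≤ r) ∨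
  (0 ≤ r ∧ 0 ≤ num_rows ∧ max r num_rows ≤ (map.length : Int) ∧
    ∀ i ∈ PySem.List.pyRange 0 (map.length : Int) 1,
      (i < max r num_rows → pvCell map c i ≠ none) ∧
      (num_rows ≤ i ∧ i < r → ¬(pvCell map c i = some '.' ∨ pvCell map c i = some '#'))) ∨
  (r < 0 ∧ 0 ≤ num_rows ∧ num_rows ≤ (map.length : Int) ∧
    (∀ i ∈ PySem.List.pyRange 0 (map.length : Int) 1, i < num_rows → pvCell map c i ≠ none) ∧
    ((∃ i ∈ PySem.List.pyRange 0 num_rows 1,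
        pvCell map c i = some '.' ∨ pvCell map c i = some '#') ∨
     (-(map.length : Int) ≤ r ∧
       ∀ i ∈ PySem.List.pyRange (-1) (-(map.length : Int) - 1) (-1), r ≤ i →
         pvCell map c i ≠ none ∧
         ¬(pvCell map c i = some '.' ∨ pvCell map c i = some '#'))))
instance (map : List String) (r : Int) (c : Int) (num_rows : Int) (num_cols : Int) : Decidable (Pre_find_up map r c num_rows num_cols) := by unfold Pre_find_up; infer_instance

def pvWitness_find_up : List String × Int × Int × Int × Int := (["."], 0, 0, 1, 1)

def Spec_find_up (map : List String) (r : Int) (c : Int) (num_rows : Int) (num_cols : Int) (out : Option (Int × Int)) : Prop := out = find_up_alt map r c num_rows num_cols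
instance (map : List String) (r : Int) (c : Int) (num_rows : Int) (num_cols : Int) (out : Option (Int × Int)) : Decidable (Spec_find_up map r c num_rows num_cols out) := by unfold Spec_find_up; infer_instance

-- ===== CLAIM (what is proved, stated in full; the proofs are below) =====
def Claim_equal_find_up : Prop := ∀ (map : List String) (r : Int) (c : Int) (num_rows : Int) (num_cols : Int), Dom_find_up map r c num_rows num_cols → Pre_find_up map r c num_rows num_cols → Spec_find_up map r c num_rows num_cols (find_up map r c num_rows num_cols)

-- ===== LEMMAS AND PROOFS =====

-- boolean form of "map[i][c] is a track cell"
def pvHit (map : List String) (c i : Int) : Bool :=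
  decide (pvCell map c i = some '.' ∨ pvCell map c i = some '#')

-- proof-side step of B's loop, phrased through pvHit
def gstep (map : List String) (r c : Int) (s : Option Int × Option Int) (i : Int) :
    Option Int × Option Int :=
  if pvHit map c i then (if i < r then (some i, s.2) else (s.1, some i)) else s

-- on readable cells, A's scan from i down to stop+1 is the first hit of range(i, stop, -1)
theorem scan_eq_find? (map : List String) (c : Int) (i stop : Int)
    (h : ∀ j ∈ PySem.List.pyRange i stop (-1), pvCell map c j ≠ none) :
    find_up_scan map c i stop
      = ((PySem.List.pyRange i stop (-1)).find? (pvHit map c)).map (fun j => (c + 1, j + 1)) := by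
  by_cases hlt : stop < i
  · rw [PySem.List.pyRange_neg_one_cons hlt] at h ⊢
    have hv := h i (by simp)
    cases hc : pvCell map c i with
    | none => exact absurd hc hv
    | some ch =>
      by_cases hh : ch = '.' ∨ ch = '#'
      · have hb : pvHit map c i = true := by
          simp only [pvHit, hc, decide_eq_true_eq]
          rcases hh with hh | hh <;> simp [hh]
        rw [find_up_scan]
        simp [hlt, hc, hh, List.find?_cons, hb]
      · have hb : pvHit map c i = false := by
          simp only [pvHit, hc, decide_eq_false_iff_not]
          simpa using hh
        rw [find_up_scan]
        simp only [hlt, dif_pos, hc, if_neg hh, List.find?_cons, hb]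
        exact scan_eq_find? map c (i - 1) stop (fun j hj => h j (by simp [hj]))
  · rw [PySem.List.pyRange_neg_one_eq_nil (by omega), List.find?_nil, Option.map_none]
    rw [find_up_scan]
    simp [hlt]
termination_by (i - stop).toNat
decreasing_by simp; omega

-- on readable cells, B's loop from i to n-1 is a fold of gstep over range(i, n)
theorem altLoop_eq_foldl (map : List String) (r c : Int) (i n : Int)
    (s : Option Int × Option Int)
    (h : ∀ j ∈ PySem.List.pyRange i n 1, pvCell map c j ≠ none) :
    find_up_altLoop map r c i n s = (PySem.List.pyRange i n 1).foldl (gstep map r c) s := by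
  by_cases hlt : i < n
  · rw [PySem.List.pyRange_one_cons hlt] at h ⊢
    have hv := h i (by simp)
    cases hc : pvCell map c i with
    | none => exact absurd hc hv
    | some ch =>
      have hs : (if ch = '.' ∨ ch = '#' then
            (if i < r then (some i, s.2) else (s.1, some i)) else s) = gstep map r c s i := by
        unfold gstep
        by_cases hh : ch = '.' ∨ ch = '#'
        · have hb : pvHit map c i = true := by
            simp only [pvHit, hc, decide_eq_true_eq]
            rcases hh with hh | hh <;> simp [hh]
          simp [hh, hb]
        · have hb : pvHit map c i = false := by
            simp only [pvHit, hc, decide_eq_false_iff_not]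
            simpa using hh
          simp [hh, hb]
      rw [find_up_altLoop]
      simp only [hlt, dif_pos, hc, hs, List.foldl_cons]
      exact altLoop_eq_foldl map r c (i + 1) n _ (fun j hj => h j (by simp [hj]))
  · rw [PySem.List.pyRange_one_eq_nil (by omega), List.foldl_nil]
    rw [find_up_altLoop]
    simp [hlt]
termination_by (n - i).toNat
decreasing_by simp; omega

-- folding gstep over indices all below r only updates the first accumulator, to the LAST hit
theorem foldl_below (map : List String) (r c : Int) (l : List Int)
    (h : ∀ i ∈ l, i < r) (s : Option Int × Option Int) :
    l.foldl (gstep map r c) s = ((l.reverse.find? (pvHit map c)).or s.1, s.2) := by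
  induction l generalizing s with
  | nil => simp
  | cons i t ih =>
    have hi : i < r := h i (by simp)
    rw [List.foldl_cons, ih (fun j hj => h j (by simp [hj]))]
    unfold gstep
    by_cases hh : pvHit map c i
    · simp only [hh, if_true, if_pos hi]
      rw [List.reverse_cons, List.find?_append]
      cases hf : t.reverse.find? (pvHit map c) <;> simp [hh]
    · simp only [Bool.not_eq_true] at hh
      simp only [hh, Bool.false_eq_true, if_false]
      rw [List.reverse_cons, List.find?_append]
      cases hf : t.reverse.find? (pvHit map c) <;> simp [hh]

-- folding gstep over indices all at or above r only updates the second accumulator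
theorem foldl_above (map : List String) (r c : Int) (l : List Int)
    (h : ∀ i ∈ l, r ≤ i) (s : Option Int × Option Int) :
    l.foldl (gstep map r c) s = (s.1, (l.reverse.find? (pvHit map c)).or s.2) := by
  induction l generalizing s with
  | nil => simp
  | cons i t ih =>
    have hi : ¬ i < r := by have := h i (by simp); omega
    rw [List.foldl_cons, ih (fun j hj => h j (by simp [hj]))]
    unfold gstep
    by_cases hh : pvHit map c i
    · simp only [hh, if_true, if_neg hi]
      rw [List.reverse_cons, List.find?_append]
      cases hf : t.reverse.find? (pvHit map c) <;> simp [hh]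
    · simp only [Bool.not_eq_true] at hh
      simp only [hh, Bool.false_eq_true, if_false]
      rw [List.reverse_cons, List.find?_append]
      cases hf : t.reverse.find? (pvHit map c) <;> simp [hh]

-- A's scan split at a midpoint: first hit of the upper part, else the scan resumes below it
theorem scan_split (map : List String) (c : Int) (i mid stop : Int)
    (h1 : stop ≤ mid) (h2 : mid ≤ i)
    (hv : ∀ j ∈ PySem.List.pyRange i mid (-1), pvCell map c j ≠ none) :
    find_up_scan map c i stop
      = match (PySem.List.pyRange i mid (-1)).find? (pvHit map c) with
        | some j => some (c + 1, j + 1)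
        | none => find_up_scan map c mid stop := by
  by_cases hlt : mid < i
  · rw [PySem.List.pyRange_neg_one_cons hlt] at hv ⊢
    have hvi := hv i (by simp)
    cases hc : pvCell map c i with
    | none => exact absurd hc hvi
    | some ch =>
      by_cases hh : ch = '.' ∨ ch = '#'
      · have hb : pvHit map c i = true := by
          simp only [pvHit, hc, decide_eq_true_eq]
          rcases hh with hh | hh <;> simp [hh]
        rw [find_up_scan]
        simp [show stop < i by omega, hc, hh, List.find?_cons, hb]
      · have hb : pvHit map c i = false := by
          simp only [pvHit, hc, decide_eq_false_iff_not]
          simpa using hh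
        rw [find_up_scan]
        simp only [show stop < i by omega, dif_pos, hc, if_neg hh, List.find?_cons, hb]
        exact scan_split map c (i - 1) mid stop h1 (by omega) (fun j hj => hv j (by simp [hj]))
  · have hieq : i = mid := by omega
    subst hieq
    rw [PySem.List.pyRange_neg_one_eq_nil (by omega)]
    simp
termination_by (i - mid).toNat
decreasing_by simp; omega

-- a list with no hit finds none
theorem find?_none_of_nohit (map : List String) (c : Int) (l : List Int)
    (h : ∀ i ∈ l, pvHit map c i = false) :
    l.find? (pvHit map c) = none := by
  rw [List.find?_eq_none]
  intro x hx
  simp [h x hx]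

-- ===== VERDICT (by name: the statement is the Claim_ definition above) =====
theorem find_up_spec : Claim_equal_find_up := by
  intro map r c n nc _ hpre
  unfold Spec_find_up find_up find_up_alt
  rcases hpre with ⟨hr, hn⟩ | ⟨hr0, hn0, hlen, hcells⟩ | ⟨hrneg, hn0, hlen, hvalid0, htail⟩
  · -- empty-window case: every loop is empty, both sides return none
    have eA1 : find_up_scan map c (r - 1) (-1) = none := by
      rw [find_up_scan]; simp [show ¬((-1 : Int) < r - 1) by omega]
    have eA2 : find_up_scan map c (n - 1) (r - 1) = none := by
      rw [find_up_scan]; simp [show ¬(r - 1 < n - 1) by omega]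
    have eB : find_up_altLoop map r c 0 n (none, none) = (none, none) := by
      rw [find_up_altLoop]; simp [show ¬((0 : Int) < n) by omega]
    rw [eA1, eA2, eB]
  · have hvalid : ∀ i : Int, 0 ≤ i → i < max r n → pvCell map c i ≠ none := by
      intro i h1 h2
      exact (hcells i (PySem.List.mem_pyRange_one.mpr ⟨h1, by omega⟩)).1 h2
    have hmiss : ∀ i ∈ PySem.List.pyRange n r 1, pvHit map c i = false := by
      intro i hi
      have hb := PySem.List.mem_pyRange_one.mp hi
      have hm := (hcells i (PySem.List.mem_pyRange_one.mpr ⟨by omega, by omega⟩)).2 ⟨hb.1, hb.2⟩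
      simp [pvHit, hm]
    rw [altLoop_eq_foldl map r c 0 n (none, none)
          (fun j hj => by
            have := PySem.List.mem_pyRange_one.mp hj
            exact hvalid j this.1 (by omega)),
        scan_eq_find? map c (r - 1) (-1)
          (fun j hj => by
            have := PySem.List.mem_pyRange_neg_one.mp hj
            exact hvalid j (by omega) (by omega))]
    have e1 : PySem.List.pyRange (r - 1) (-1) (-1) = (PySem.List.pyRange 0 r 1).reverse := by
      rw [PySem.List.pyRange_neg_one_eq_reverse]; norm_num
    by_cases hrn : r ≤ n
    · -- in-window case: split B's forward range at r
      rw [scan_eq_find? map c (n - 1) (r - 1)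
            (fun j hj => by
              have := PySem.List.mem_pyRange_neg_one.mp hj
              exact hvalid j (by omega) (by omega)),
          PySem.List.pyRange_one_append 0 r n hr0 hrn, List.foldl_append,
          foldl_below map r c _ (fun i hi => (PySem.List.mem_pyRange_one.mp hi).2) (none, none),
          foldl_above map r c _ (fun i hi => (PySem.List.mem_pyRange_one.mp hi).1)]
      have e2 : PySem.List.pyRange (n - 1) (r - 1) (-1) = (PySem.List.pyRange r n 1).reverse := by
        rw [PySem.List.pyRange_neg_one_eq_reverse]; norm_num
      rw [e1, e2]
      cases hf1 : ((PySem.List.pyRange 0 r 1).reverse).find? (pvHit map c) <;>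
        cases hf2 : ((PySem.List.pyRange r n 1).reverse).find? (pvHit map c) <;>
        simp [Option.or]
    · -- r beyond the window: A's extra rows n..r-1 are all misses, its second loop is empty
      rw [foldl_below map r c _
            (fun i hi => by have := PySem.List.mem_pyRange_one.mp hi; omega) (none, none),
          e1, PySem.List.pyRange_one_append 0 n r hn0 (by omega), List.reverse_append,
          List.find?_append,
          find?_none_of_nohit map c _ (fun i hi => hmiss i (List.mem_reverse.mp hi))]
      have e3 : find_up_scan map c (n - 1) (r - 1) = none := by
        rw [find_up_scan]
        simp [show ¬(r - 1 < n - 1) by omega]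
      cases hf : ((PySem.List.pyRange 0 n 1).reverse).find? (pvHit map c) <;>
        simp [Option.or, e3]
  · -- r < 0: A's first loop is empty; its second scans the window top-down, then the wrapped tail
    have hvalid : ∀ i : Int, 0 ≤ i → i < n → pvCell map c i ≠ none := by
      intro i hA hB
      exact hvalid0 i (PySem.List.mem_pyRange_one.mpr ⟨hA, by omega⟩) hB
    have eA1 : find_up_scan map c (r - 1) (-1) = none := by
      rw [find_up_scan]; simp [show ¬((-1 : Int) < r - 1) by omega]
    rw [altLoop_eq_foldl map r c 0 n (none, none)
          (fun j hj => by
            have := PySem.List.mem_pyRange_one.mp hj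
            exact hvalid j this.1 this.2),
        foldl_above map r c _
          (fun i hi => by have := PySem.List.mem_pyRange_one.mp hi; omega) (none, none),
        eA1,
        scan_split map c (n - 1) (-1) (r - 1) (by omega) (by omega)
          (fun j hj => by
            have := PySem.List.mem_pyRange_neg_one.mp hj
            exact hvalid j (by omega) (by omega))]
    have e4 : PySem.List.pyRange (n - 1) (-1) (-1) = (PySem.List.pyRange 0 n 1).reverse := by
      rw [PySem.List.pyRange_neg_one_eq_reverse]; norm_num
    rw [e4]
    cases hf : ((PySem.List.pyRange 0 n 1).reverse).find? (pvHit map c) with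
    | some j => simp [Option.or]
    | none =>
      have hnohit : ∀ j ∈ PySem.List.pyRange 0 n 1, pvHit map c j = false := by
        intro j hj
        have := List.find?_eq_none.mp hf j (List.mem_reverse.mpr hj)
        simpa using this
      rcases htail with ⟨j, hj, hhit⟩ | ⟨hrlen, htl⟩
      · exact absurd (by simp [pvHit, hhit.imp id id] : pvHit map c j = true)
          (by simp [hnohit j hj])
      · have eT : find_up_scan map c (-1) (r - 1) = none := by
          rw [scan_eq_find? map c (-1) (r - 1)
                (fun j hj => by
                  have := PySem.List.mem_pyRange_neg_one.mp hj
                  exact (htl j (PySem.List.mem_pyRange_neg_one.mpr ⟨by omega, by omega⟩)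
                    (by omega)).1),
              find?_none_of_nohit map c _
                (fun j hj => by
                  have := PySem.List.mem_pyRange_neg_one.mp hj
                  have hm := (htl j (PySem.List.mem_pyRange_neg_one.mpr ⟨by omega, by omega⟩)
                    (by omega)).2
                  simp [pvHit, hm])]
          rfl
        simp [Option.or, eT]
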